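-- pv_equiv track=rewrite | github.com/DhruvSkyy/nmr-analyser | src/nmr_analyser/j_val.py | factorize_multiplicity
-- ===== SOURCE A (Python) =====
-- def factorize_multiplicity(num_peaks: int) -> list[str]:
--     """
--     Algorithm to generate all possible multiplicity labels for a given number of peaks using backtracking.
--
--     Parameters
--     ----------
--     num_peaks : int
--         The number of peaks to factorize.
--
--     Returns
--     -------
--     list of str
--         A sorted list of possible multiplicity labels or ["multiple"] if no valid factorisation exists.
--
--     Algorithm
--     ---------
--     This function uses a backtracking algorithm to explore all possible factorizations of `num_peaks`
--     using specific factor ranges and maps these factorizations to their respective labels.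
--
--     Rules
--     -----
--     - If num_peaks > 36, returns ["multiplet"].
--     - If num_peaks == 1, returns ["s"] (singlet).
--     - If num_peaks <= 7:
--         - Uses possible factors [2..7] with specific labels.
--         - Generates all permutations of valid factorizations.
--     - If num_peaks > 7:
--         - Restricts factors to [2, 3, 4] with labels ("d", "t", "q").
--         - Returns ["multiplet"] if no valid factorization is found.
--
--     Examples
--     --------
--     >>> factorize_multiplicity(4)
--     ['dd', 'q']
--     >>> factorize_multiplicity(6)
--     ['dt', 'hex', 'td']
--     >>> factorize_multiplicity(8)
--     ['ddd', 'dq', 'qd']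
--     >>> factorize_multiplicity(1)
--     ['s']
--     >>> factorize_multiplicity(40)
--     ['multiplet']
--     >>> factorize_multiplicity(11)
--     ['multiplet']
--     """
--     if num_peaks > 36:
--         return ["multiplet"]
--     if num_peaks == 1:
--         return ["s"]
--
--     FACTORS_UP_TO_7 = {
--         2: "d",
--         3: "t",
--         4: "q",
--         5: "quintet",
--         6: "hex",
--         7: "hept"
--     }
--     FACTORS_ABOVE_7 = {
--         2: "d",
--         3: "t",
--         4: "q"
--     }
--
--     if num_peaks <= 7:
--         factor_dict = FACTORS_UP_TO_7
--         factor_range = range(2, 8)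
--     else:
--         factor_dict = FACTORS_ABOVE_7
--         factor_range = range(2, 5)
--
--     results = []
--
--     def backtrack(current, path):
--         if current == 1:
--             results.append(path[:])
--             return
--         for f in factor_range:
--             if current % f == 0:
--                 path.append(f)
--                 backtrack(current // f, path)
--                 path.pop()
--
--     backtrack(num_peaks, [])
--
--     labels = set()
--     for seq in results:
--         label_str = "".join(factor_dict[f] for f in seq)
--         labels.add(label_str)
--
--     if num_peaks <= 7 and num_peaks in factor_dict:
--         labels.add(factor_dict[num_peaks])
--
--     final_labels = sorted(labels)
--
--     return final_labels if final_labels else ["multiplet"]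
-- ===== SOURCE B (Python) =====
-- def factorize_multiplicity(num_peaks: int) -> list[str]:
--     if num_peaks > 36:
--         return ["multiplet"]
--     if num_peaks == 1:
--         return ["s"]
--     if num_peaks <= 7:
--         factor_dict = {2: "d", 3: "t", 4: "q", 5: "quintet", 6: "hex", 7: "hept"}
--     else:
--         factor_dict = {2: "d", 3: "t", 4: "q"}
--     # bottom-up table: table[m] = set of labels of the ordered factorizations of m
--     table = {1: {""}}
--     for m in range(2, num_peaks + 1):
--         table[m] = {name + s
--                     for f, name in factor_dict.items() if m % f == 0
--                     for s in table[m // f]}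
--     final_labels = sorted(table.get(num_peaks, set()))
--     return final_labels if final_labels else ["multiplet"]
-- ===== Notes on version B (the rewrite author's own statement) =====
-- stated objective: alternative
-- what changed: Replaces the recursive backtracking helper that mutates a shared path list and appends factor sequences to a results list (then joins and dedups them into a set, plus a redundant single-factor add) by an iterative bottom-up dynamic-programming table filled for m = 2..num_peaks, where table[m] is the set of label strings of m built from the already-computed table[m // f].
-- crash fix: On num_peaks == 0 Python A recurses forever (0 % f == 0 for every factor) and raises RecursionError, while B's loop body never runs and it returns ["multiplet"]. — e.g. on factorize_multiplicity(0): A raises RecursionError, B returns ["multiplet"]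
import Mathlib
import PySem

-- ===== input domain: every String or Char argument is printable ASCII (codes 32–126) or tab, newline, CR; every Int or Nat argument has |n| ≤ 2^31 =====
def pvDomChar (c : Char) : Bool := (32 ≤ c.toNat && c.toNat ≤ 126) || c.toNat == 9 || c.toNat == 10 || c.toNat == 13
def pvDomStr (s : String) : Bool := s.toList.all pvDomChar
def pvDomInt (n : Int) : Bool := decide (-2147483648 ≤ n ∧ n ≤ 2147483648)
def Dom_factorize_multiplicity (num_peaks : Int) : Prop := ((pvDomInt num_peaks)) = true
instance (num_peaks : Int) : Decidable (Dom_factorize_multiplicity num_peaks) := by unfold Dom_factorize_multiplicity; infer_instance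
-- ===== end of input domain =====

-- B replaces A's recursive backtracking (shared path / results list, then join + dedup into a set)
-- by an iterative bottom-up dynamic-programming table: table[m] = set of labels of m, filled for
-- m = 2..n in one loop. Same result, no recursion. Both Pythons agree wherever A returns; Python A
-- recurses forever (RecursionError) on num_peaks == 0, which Pre_ excludes and where B returns
-- ["multiplet"]; A's Lean port bounds that recursion with fuel (natAbs + 1, enough on every input
-- Pre_ admits, since |current| at least halves at each recursive call).

-- ===== PORT A =====
def pvDict7 : PySem.Dict Int String :=
  PySem.Dict.ofList [(2, "d"), (3, "t"), (4, "q"), (5, "quintet"), (6, "hex"), (7, "hept")]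
def pvDict3 : PySem.Dict Int String :=
  PySem.Dict.ofList [(2, "d"), (3, "t"), (4, "q")]

-- def backtrack(current, path): … (recursion bounded by fuel; see header note)
def pvBacktrackA (fr : List Int) (fuel : Nat) (current : Int) (path : List Int)
    (results : List (List Int)) : List (List Int) :=
  match fuel with
  | 0 => results
  | fuel + 1 =>
    if current = 1 then results ++ [path]
    else
      fr.foldl (fun res f =>
        if PySem.Int.mod current f = 0 then
          pvBacktrackA fr fuel (PySem.Int.floordiv current f) (path ++ [f]) res
        else res) results

def factorize_multiplicity (num_peaks : Int) : List String :=
  if num_peaks > 36 then ["multiplet"]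
  else if num_peaks = 1 then ["s"]
  else
    let factor_dict := if num_peaks ≤ 7 then pvDict7 else pvDict3
    let factor_range := if num_peaks ≤ 7 then PySem.List.pyRange 2 8 1 else PySem.List.pyRange 2 5 1
    let results := pvBacktrackA factor_range (num_peaks.natAbs + 1) num_peaks [] []
    let labels : PySem.Set String :=
      results.foldl
        (fun s seq => PySem.Set.add s (PySem.Str.join "" (seq.map (fun f => factor_dict.getD f ""))))
        PySem.Set.empty
    let labels :=
      if num_peaks ≤ 7 ∧ factor_dict.contains num_peaks then
        PySem.Set.add labels (factor_dict.getD num_peaks "")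
      else labels
    let final_labels := PySem.List.sorted labels (fun x => x) false
    if final_labels ≠ [] then final_labels else ["multiplet"]

-- ===== PORT B =====
def pvDictB7 : PySem.Dict Int String :=
  PySem.Dict.ofList [(2, "d"), (3, "t"), (4, "q"), (5, "quintet"), (6, "hex"), (7, "hept")]
def pvDictB3 : PySem.Dict Int String :=
  PySem.Dict.ofList [(2, "d"), (3, "t"), (4, "q")]

-- one iteration of B's DP loop: table[m] = {name + s for f, name in factor_dict.items()
--                                           if m % f == 0 for s in table[m // f]}
-- (Python's table[m // f] never misses a key on the reached indices; ported as getD with ∅,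
--  exact wherever the Python expression evaluates)
def pvDPStep (fd : PySem.Dict Int String) (t : PySem.Dict Int (PySem.Set String)) (m : Int) :
    PySem.Dict Int (PySem.Set String) :=
  t.insert m
    (fd.items.foldl (fun acc p =>
      if PySem.Int.mod m p.1 = 0 then
        (t.getD (PySem.Int.floordiv m p.1) PySem.Set.empty).foldl
          (fun acc2 s => PySem.Set.add acc2 (p.2 ++ s)) acc
      else acc) PySem.Set.empty)

def factorize_multiplicity_alt (num_peaks : Int) : List String :=
  if num_peaks > 36 then ["multiplet"]
  else if num_peaks = 1 then ["s"]
  else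
    let factor_dict := if num_peaks ≤ 7 then pvDictB7 else pvDictB3
    let table0 : PySem.Dict Int (PySem.Set String) :=
      PySem.Dict.ofList [(1, PySem.Set.ofList [""])]
    let table := (PySem.List.pyRange 2 (num_peaks + 1) 1).foldl (pvDPStep factor_dict) table0
    let final_labels :=
      PySem.List.sorted (table.getD num_peaks PySem.Set.empty) (fun x => x) false
    if final_labels ≠ [] then final_labels else ["multiplet"]

-- ===== PRECONDITION & SPEC =====
-- Pre_ excludes only num_peaks = 0, on which Python A recurses forever and raises RecursionError.
def Pre_factorize_multiplicity (num_peaks : Int) : Prop := num_peaks ≠ 0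
instance (num_peaks : Int) : Decidable (Pre_factorize_multiplicity num_peaks) := by
  unfold Pre_factorize_multiplicity; infer_instance
def pvWitness_factorize_multiplicity : Int := (12)

-- On num_peaks = 0 Python A raises RecursionError (0 % f == 0 forever) while B's loop is empty and returns ["multiplet"].
-- Crash fix made checkable (theorem factorize_multiplicity_raises below): on num_peaks = 0 Python A
-- raises RecursionError (0 % f == 0 for every factor, so backtrack(0, …) recurses forever) while B's
-- loop body never runs and it returns ["multiplet"].
def Raises_factorize_multiplicity (num_peaks : Int) : Prop := num_peaks = 0
instance (num_peaks : Int) : Decidable (Raises_factorize_multiplicity num_peaks) := by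
  unfold Raises_factorize_multiplicity; infer_instance
def pvRaiseWitness_factorize_multiplicity : Int := (0)
def pvRaiseWitnessOut_factorize_multiplicity : List String := ["multiplet"]

def Spec_factorize_multiplicity (num_peaks : Int) (out : List String) : Prop :=
  out = factorize_multiplicity_alt num_peaks
instance (num_peaks : Int) (out : List String) : Decidable (Spec_factorize_multiplicity num_peaks out) := by
  unfold Spec_factorize_multiplicity; infer_instance

-- ===== CLAIM (what is proved, stated in full; the proofs are below) =====
def Claim_equal_factorize_multiplicity : Prop := ∀ (num_peaks : Int), Dom_factorize_multiplicity num_peaks → Pre_factorize_multiplicity num_peaks → Spec_factorize_multiplicity num_peaks (factorize_multiplicity num_peaks)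
def Claim_raises_factorize_multiplicity : Prop := (∀ (num_peaks : Int), Dom_factorize_multiplicity num_peaks → Raises_factorize_multiplicity num_peaks → ¬ Pre_factorize_multiplicity num_peaks) ∧ (Dom_factorize_multiplicity (pvRaiseWitness_factorize_multiplicity) ∧ Raises_factorize_multiplicity (pvRaiseWitness_factorize_multiplicity) ∧ factorize_multiplicity_alt (pvRaiseWitness_factorize_multiplicity) = pvRaiseWitnessOut_factorize_multiplicity)
-- ===== LEMMAS AND PROOFS =====

-- the final label set of port A (its let-chain, named so the proof can speak about it)
def pvLabelsA (n : Int) : PySem.Set String :=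
  let factor_dict := if n ≤ 7 then pvDict7 else pvDict3
  let factor_range := if n ≤ 7 then PySem.List.pyRange 2 8 1 else PySem.List.pyRange 2 5 1
  let results := pvBacktrackA factor_range (n.natAbs + 1) n [] []
  let labels : PySem.Set String :=
    results.foldl
      (fun s seq => PySem.Set.add s (PySem.Str.join "" (seq.map (fun f => factor_dict.getD f ""))))
      PySem.Set.empty
  if n ≤ 7 ∧ factor_dict.contains n then PySem.Set.add labels (factor_dict.getD n "") else labels

-- the label set port B looks up in its finished table
def pvTableB (n : Int) : PySem.Set String :=
  let factor_dict := if n ≤ 7 then pvDictB7 else pvDictB3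
  let table0 : PySem.Dict Int (PySem.Set String) :=
    PySem.Dict.ofList [(1, PySem.Set.ofList [""])]
  let table := (PySem.List.pyRange 2 (n + 1) 1).foldl (pvDPStep factor_dict) table0
  table.getD n PySem.Set.empty

-- if the two label sets are permutations of each other, the two programs agree
theorem pvMain (n : Int) (h36 : ¬ n > 36) (h1 : ¬ n = 1)
    (hperm : (pvLabelsA n).Perm (pvTableB n)) :
    factorize_multiplicity n = factorize_multiplicity_alt n := by
  unfold factorize_multiplicity factorize_multiplicity_alt
  simp only [if_neg h36, if_neg h1]
  show (if PySem.List.sorted (pvLabelsA n) (fun x => x) false ≠ [] then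
          PySem.List.sorted (pvLabelsA n) (fun x => x) false else ["multiplet"])
      = (if PySem.List.sorted (pvTableB n) (fun x => x) false ≠ [] then
          PySem.List.sorted (pvTableB n) (fun x => x) false else ["multiplet"])
  rw [(PySem.List.sorted_id_eq_sorted_id_iff_perm (pvLabelsA n) (pvTableB n)).mpr hperm]

-- a fold whose step fixes every list element is the identity
theorem pvFoldl_fixed {A B : Type} (g : A -> B -> A) :
    ∀ (l : List B) (res : A), (∀ r f, f ∈ l → g r f = r) → l.foldl g res = res := by
  intro l
  induction l with
  | nil => intro res _; rfl
  | cons f fs ih =>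
    intro res h
    simp only [List.foldl_cons]
    rw [h res f (by simp)]
    exact ih res (fun r g hg => h r g (by simp [hg]))

-- a quotient by a factor ≥ 2 of a negative number stays negative
theorem pvFloordiv_neg_of_neg (n f : Int) (hn : n < 0) (hf : 2 ≤ f)
    (hm : PySem.Int.mod n f = 0) : PySem.Int.floordiv n f < 0 := by
  have hdvd : f ∣ n := (PySem.Int.mod_eq_zero_iff_dvd n f).mp hm
  obtain ⟨q, rfl⟩ := hdvd
  rw [PySem.Int.floordiv_eq_ediv_of_pos (by omega : (0 : Int) < f)]
  rw [Int.mul_ediv_cancel_left _ (by omega : f ≠ 0)]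
  by_contra h
  rw [Int.not_lt] at h
  have : 0 ≤ f * q := mul_nonneg (by omega) h
  omega

-- A's backtracking collects nothing from a negative current value
theorem pvBacktrackA_neg (fr : List Int) (hfr : ∀ f ∈ fr, 2 ≤ f) (fuel : Nat) :
    ∀ (n : Int) (path : List Int) (res : List (List Int)), n < 0 →
      pvBacktrackA fr fuel n path res = res := by
  induction fuel with
  | zero => intro n path res _; rfl
  | succ fuel ih =>
    intro n path res hn
    rw [pvBacktrackA]
    rw [if_neg (by omega : ¬ n = 1)]
    apply pvFoldl_fixed
    intro r f hf
    split_ifs with hc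
    · exact ih _ _ _ (pvFloordiv_neg_of_neg n f hn (hfr f hf) hc)
    · rfl

-- on a negative input both label sets are empty
theorem pvLabelsA_neg (n : Int) (hn : n < 0) : pvLabelsA n = PySem.Set.empty := by
  unfold pvLabelsA
  simp only [if_pos (by omega : n ≤ 7)]
  rw [pvBacktrackA_neg _ (by decide) _ n [] [] hn]
  rw [if_neg]
  · rfl
  rintro ⟨-, hcon⟩
  rw [PySem.Dict.contains_eq_decide_mem_keys] at hcon
  have hmem : n ∈ pvDict7.keys := of_decide_eq_true hcon
  have hk : pvDict7.keys = [2, 3, 4, 5, 6, 7] := by decide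
  rw [hk] at hmem
  simp only [List.mem_cons, List.not_mem_nil, or_false] at hmem
  omega

theorem pvTableB_neg (n : Int) (hn : n < 0) : pvTableB n = PySem.Set.empty := by
  unfold pvTableB
  rw [PySem.List.pyRange_one_eq_nil (by omega : n + 1 ≤ 2)]
  simp only [List.foldl_nil]
  apply PySem.Dict.getD_of_not_contains
  rw [PySem.Dict.contains_eq_decide_mem_keys]
  simp only [decide_eq_false_iff_not]
  intro hmem
  have hk : (PySem.Dict.ofList [((1 : Int), PySem.Set.ofList [""])]).keys = [1] := by decide
  rw [hk] at hmem
  simp only [List.mem_cons, List.not_mem_nil, or_false] at hmem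
  omega

-- ===== VERDICT (by name: the statement is the Claim_ definition above) =====
set_option maxRecDepth 100000 in
set_option maxHeartbeats 2000000 in
theorem factorize_multiplicity_spec : Claim_equal_factorize_multiplicity := by
  intro n _ hpre
  unfold Pre_factorize_multiplicity at hpre
  unfold Spec_factorize_multiplicity
  by_cases h36 : n > 36
  · unfold factorize_multiplicity factorize_multiplicity_alt
    simp [h36]
  · by_cases hpos : 1 ≤ n
    · -- 1 ≤ n ≤ 36: finitely many values; the two label sets are computed and compared as sets
      interval_cases n
      <;> first
        | decide
        | exact pvMain _ (by decide) (by decide) (by decide)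
    · -- n < 0 (n ≠ 0): both label sets are empty
      have hn : n < 0 := by omega
      exact pvMain n (by omega) (by omega)
        (by rw [pvLabelsA_neg n hn, pvTableB_neg n hn])

@[simp]
theorem factorize_multiplicity_raises : Claim_raises_factorize_multiplicity := by
  unfold Claim_raises_factorize_multiplicity
  exact ⟨by intro n _ h hp; exact hp h, by decide⟩
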